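-- pv_equiv track=rewrite | github.com/Chasonnnn/GenAI-assited-CRM-Tool | apps/api/app/services/ticketing_service.py | _subject_norm
-- ===== SOURCE A (Python) =====
-- def _subject_norm(subject: str | None) -> str | None:
--     if not subject:
--         return None
--     normalized = " ".join(subject.strip().split())
--     lowered = normalized.lower()
--     # Strip common reply prefixes repeatedly.
--     while lowered.startswith(("re:", "fw:", "fwd:")):
--         normalized = normalized.split(":", 1)[1].strip()
--         lowered = normalized.lower()
--     return normalized or None
-- ===== SOURCE B (Python) =====
-- import re
--
-- _REPLY_PREFIX_RE = re.compile(r"^(?:(?:re|fw|fwd):\s*)+", re.IGNORECASE)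
--
--
-- def _subject_norm(subject: str | None) -> str | None:
--     if not subject:
--         return None
--     normalized = " ".join(subject.strip().split())
--     normalized = _REPLY_PREFIX_RE.sub("", normalized)
--     return normalized or None
-- ===== Notes on version B (the rewrite author's own statement) =====
-- stated objective: idiomatic
-- what changed: Replaced A's while-loop of lower()/startswith/split(':',1)/strip() bookkeeping with a single precompiled regex substitution ^(?:(?:re|fw|fwd):\s*)+ -> '' that strips all stacked reply prefixes in one pass.
import Mathlib
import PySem

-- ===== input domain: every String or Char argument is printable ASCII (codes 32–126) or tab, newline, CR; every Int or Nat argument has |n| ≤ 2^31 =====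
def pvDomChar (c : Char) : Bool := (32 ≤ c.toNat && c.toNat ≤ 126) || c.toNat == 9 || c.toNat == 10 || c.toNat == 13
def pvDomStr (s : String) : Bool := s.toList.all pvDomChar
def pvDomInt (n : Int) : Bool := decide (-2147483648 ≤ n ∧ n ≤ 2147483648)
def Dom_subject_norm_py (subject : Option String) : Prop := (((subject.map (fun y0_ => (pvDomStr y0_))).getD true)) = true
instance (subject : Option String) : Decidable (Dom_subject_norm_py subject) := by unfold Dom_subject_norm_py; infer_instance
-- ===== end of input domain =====

-- B replaces A's while-loop of lower/startswith/split(':',1)/strip bookkeeping by a single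
-- regex-style substitution ^(?:(?:re|fw|fwd):\s*)+ -> ''; objective: idiomatic.

-- ===== PORT B helpers (the regex of Source B, rendered as a prefix matcher) =====
-- regex \s character class (ASCII part, as `re` on str)
def pvIsRegexSpace (c : Char) : Bool :=
  c == ' ' || c == '\t' || c == '\n' || c == '\r' || c == '\x0b' || c == '\x0c'

-- one alternation step `(re|fwd|fw):` case-insensitively, in the regex's alternation order
def pvMatchPrefix : List Char → Option (List Char)
  | c1 :: c2 :: c3 :: rest =>
    if ((PySem.Chars.lowerChar c1 == 'r' && PySem.Chars.lowerChar c2 == 'e')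
        || (PySem.Chars.lowerChar c1 == 'f' && PySem.Chars.lowerChar c2 == 'w')) && c3 == ':' then
      some rest
    else if PySem.Chars.lowerChar c1 == 'f' && PySem.Chars.lowerChar c2 == 'w'
            && PySem.Chars.lowerChar c3 == 'd' then
      match rest with
      | c4 :: rest' => if c4 == ':' then some rest' else none
      | [] => none
    else none
  | _ => none

-- ===== PORT A helpers =====
-- the `while` guard: lowered.startswith(("re:", "fw:", "fwd:"))
def pvLoweredGuard (normalized : List Char) : Bool :=
  let lowered := PySem.Chars.lower normalized
  PySem.Chars.startswith lowered ['r', 'e', ':'] || PySem.Chars.startswith lowered ['f', 'w', ':']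
    || PySem.Chars.startswith lowered ['f', 'w', 'd', ':']

-- the loop body: normalized.split(":", 1)[1].strip()  ([1] exists whenever the guard holds;
-- `.getD []` only discharges the Option and is never the taken branch under the guard)
def pvSplitTail (normalized : List Char) : List Char :=
  PySem.Chars.strip ((PySem.List.pyGet? (PySem.Chars.splitOnMax normalized [':'] 1) 1).getD [])

-- ===== PORT A =====
-- the `while` loop of A (structural on a fuel that the loop, shortening the string
-- by at least 3 each iteration, can never exhaust)
def pvALoop : Nat → List Char → List Char
  | 0, normalized => normalized
  | fuel + 1, normalized =>
    if pvLoweredGuard normalized = true then pvALoop fuel (pvSplitTail normalized)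
    else normalized

def subject_norm_py (subject : Option String) : Option String :=
  match subject with
  | none => none
  | some s =>
    if s = "" then none
    else
      let normalized := PySem.Str.join " " (PySem.Str.split₀ (PySem.Str.strip s))
      let result := pvALoop (normalized.toList.length + 1) normalized.toList
      if result = [] then none else some (String.ofList result)

-- ===== PORT B =====
-- the whole anchored regex (?:(?:re|fw|fwd):\s*)+ removed by re.sub
def pvBStrip : Nat → List Char → List Char
  | 0, cs => cs
  | fuel + 1, cs =>
    match pvMatchPrefix cs with
    | some rest => pvBStrip fuel (rest.dropWhile pvIsRegexSpace)
    | none => cs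

def subject_norm_py_alt (subject : Option String) : Option String :=
  match subject with
  | none => none
  | some s =>
    if s = "" then none
    else
      let normalized := PySem.Str.join " " (PySem.Str.split₀ (PySem.Str.strip s))
      let result := pvBStrip (normalized.toList.length + 1) normalized.toList
      if result = [] then none else some (String.ofList result)

-- ===== PRECONDITION & SPEC =====
def Spec_subject_norm_py (subject : Option String) (out : Option String) : Prop := out = subject_norm_py_alt subject
instance (subject : Option String) (out : Option String) : Decidable (Spec_subject_norm_py subject out) := by unfold Spec_subject_norm_py; infer_instance

-- ===== CLAIM (what is proved, stated in full; the proofs are below) =====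
def Claim_equal_subject_norm_py : Prop := ∀ (subject : Option String), Dom_subject_norm_py subject → Spec_subject_norm_py subject (subject_norm_py subject)

-- ===== LEMMAS AND PROOFS =====

-- ---- computing split(':',1) on a string that starts with a matched prefix ----

lemma pv_go_mzero' (f : Nat) (l : List Char) (acc : List (List Char)) :
    PySem.Chars.splitOnMax.go [':'] f 0 l [] acc = (l :: acc).reverse := by
  cases f <;> cases l <;> simp [PySem.Chars.splitOnMax.go]

lemma pv_go_char (f : Nat) (m : Nat) (l cur : List Char) (acc : List (List Char)) (c : Char)
    (hc : c ≠ ':') (hm : m ≠ 0) :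
    PySem.Chars.splitOnMax.go [':'] (f + 1) m (c :: l) cur acc
      = PySem.Chars.splitOnMax.go [':'] f m l (c :: cur) acc := by
  have hb : (':' == c) = false := beq_eq_false_iff_ne.mpr (Ne.symm hc)
  simp [PySem.Chars.splitOnMax.go, List.isPrefixOf, hb, hm]

lemma pv_go_colon (f : Nat) (l cur : List Char) (acc : List (List Char)) :
    PySem.Chars.splitOnMax.go [':'] (f + 1) 1 (':' :: l) cur acc
      = (l :: cur.reverse :: acc).reverse := by
  rw [show PySem.Chars.splitOnMax.go [':'] (f + 1) 1 (':' :: l) cur acc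
      = PySem.Chars.splitOnMax.go [':'] f 0 l [] (cur.reverse :: acc) from by
    simp [PySem.Chars.splitOnMax.go, List.isPrefixOf]]
  exact pv_go_mzero' f l (cur.reverse :: acc)

lemma pv_split2 (a b : Char) (r : List Char) (ha : a ≠ ':') (hb : b ≠ ':') :
    PySem.Chars.splitOnMax (a :: b :: ':' :: r) [':'] 1 = [[a, b], r] := by
  have hlen : (a :: b :: ':' :: r).length + 1 = (r.length + 3) + 1 := by simp
  simp only [PySem.Chars.splitOnMax, show ¬((1 : Int) < 0) from by norm_num, if_false, hlen]
  rw [show ((1 : Int).toNat) = 1 from rfl]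
  rw [show r.length + 3 + 1 = (r.length + 2) + 1 + 1 from rfl, pv_go_char _ _ _ _ _ _ ha (by omega),
    show r.length + 2 + 1 = (r.length + 1) + 1 + 1 from rfl, pv_go_char _ _ _ _ _ _ hb (by omega),
    pv_go_colon]
  simp

lemma pv_split3 (a b c : Char) (r : List Char) (ha : a ≠ ':') (hb : b ≠ ':') (hc : c ≠ ':') :
    PySem.Chars.splitOnMax (a :: b :: c :: ':' :: r) [':'] 1 = [[a, b, c], r] := by
  have hlen : (a :: b :: c :: ':' :: r).length + 1 = (r.length + 4) + 1 := by simp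
  simp only [PySem.Chars.splitOnMax, show ¬((1 : Int) < 0) from by norm_num, if_false, hlen]
  rw [show ((1 : Int).toNat) = 1 from rfl]
  rw [show r.length + 4 + 1 = (r.length + 3) + 1 + 1 from rfl, pv_go_char _ _ _ _ _ _ ha (by omega),
    show r.length + 3 + 1 = (r.length + 2) + 1 + 1 from rfl, pv_go_char _ _ _ _ _ _ hb (by omega),
    show r.length + 2 + 1 = (r.length + 1) + 1 + 1 from rfl, pv_go_char _ _ _ _ _ _ hc (by omega),
    pv_go_colon]
  simp

lemma pv_pyGet1 (x y : List Char) : (PySem.List.pyGet? [x, y] 1).getD [] = y := by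
  simp [PySem.List.pyGet?, PySem.List.pyIdx?]

lemma pvLower_colon (c : Char) (h : PySem.Chars.lowerChar c = ':') : c = ':' := by
  unfold PySem.Chars.lowerChar at h
  split at h
  · exfalso
    rename_i hup
    have hA : ('A' : Char).val.toNat = 65 := by decide
    have hZ : ('Z' : Char).val.toNat = 90 := by decide
    have hcv : c.toNat = c.val.toNat := rfl
    simp only [PySem.Chars.isupper, Bool.and_eq_true, decide_eq_true_eq, Char.le_def,
      UInt32.le_iff_toNat_le] at hup
    have hv : (c.toNat + 32).isValidChar := Or.inl (by omega)
    have h2 := congrArg Char.toNat h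
    rw [Char.toNat_ofNat, if_pos hv] at h2
    have h58 : (':' : Char).toNat = 58 := by decide
    omega
  · exact h

-- A's guard agrees with B's matcher, and A's split+strip acts on the matcher's remainder
lemma pvStep (cs : List Char) :
    (pvLoweredGuard cs = false ∧ pvMatchPrefix cs = none) ∨
    (∃ rest, pvLoweredGuard cs = true ∧ pvMatchPrefix cs = some rest ∧
      pvSplitTail cs = PySem.Chars.strip rest ∧ rest.length + 3 ≤ cs.length ∧ rest <:+ cs) := by
  have hco : PySem.Chars.lowerChar ':' = ':' := by decide
  match cs with
  | [] => exact Or.inl ⟨by decide, rfl⟩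
  | [c1] =>
    exact Or.inl ⟨by simp [pvLoweredGuard, PySem.Chars.startswith, PySem.Chars.lower,
      List.isPrefixOf], rfl⟩
  | [c1, c2] =>
    exact Or.inl ⟨by simp [pvLoweredGuard, PySem.Chars.startswith, PySem.Chars.lower,
      List.isPrefixOf], rfl⟩
  | c1 :: c2 :: c3 :: r =>
    by_cases hc3 : c3 = ':'
    · subst hc3
      by_cases h12 : (PySem.Chars.lowerChar c1 = 'r' ∧ PySem.Chars.lowerChar c2 = 'e')
          ∨ (PySem.Chars.lowerChar c1 = 'f' ∧ PySem.Chars.lowerChar c2 = 'w')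
      · have ha : c1 ≠ ':' := by
          rcases h12 with ⟨h1, _⟩ | ⟨h1, _⟩ <;>
            · intro he; rw [he, hco] at h1; exact absurd h1 (by decide)
        have hb : c2 ≠ ':' := by
          rcases h12 with ⟨_, h2⟩ | ⟨_, h2⟩ <;>
            · intro he; rw [he, hco] at h2; exact absurd h2 (by decide)
        refine Or.inr ⟨r, ?_, ?_, ?_, by simp, ⟨[c1, c2, ':'], rfl⟩⟩
        · rcases h12 with ⟨h1, h2⟩ | ⟨h1, h2⟩ <;>
            simp [pvLoweredGuard, PySem.Chars.startswith, PySem.Chars.lower, List.isPrefixOf,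
              h1, h2, hco]
        · rcases h12 with ⟨h1, h2⟩ | ⟨h1, h2⟩ <;> simp [pvMatchPrefix, h1, h2]
        · unfold pvSplitTail
          rw [pv_split2 _ _ _ ha hb, pv_pyGet1]
      · constructor
        constructor
        · by_cases a1 : PySem.Chars.lowerChar c1 = 'r' <;>
          by_cases a2 : PySem.Chars.lowerChar c2 = 'e' <;>
          by_cases a3 : PySem.Chars.lowerChar c1 = 'f' <;>
          by_cases a4 : PySem.Chars.lowerChar c2 = 'w' <;>
            (try simp_all [pvLoweredGuard, PySem.Chars.startswith, PySem.Chars.lower,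
              List.isPrefixOf, hco]) <;> (try simp_all [eq_comm])
        · by_cases a1 : PySem.Chars.lowerChar c1 = 'r' <;>
          by_cases a2 : PySem.Chars.lowerChar c2 = 'e' <;>
          by_cases a3 : PySem.Chars.lowerChar c1 = 'f' <;>
          by_cases a4 : PySem.Chars.lowerChar c2 = 'w' <;>
            (try simp_all [pvMatchPrefix, hco]) <;> (try simp_all [eq_comm])
    · have hl3 : PySem.Chars.lowerChar c3 ≠ ':' := fun hh => hc3 (pvLower_colon _ hh)
      have hb3 : ((':' : Char) == PySem.Chars.lowerChar c3) = false :=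
        beq_eq_false_iff_ne.mpr (Ne.symm hl3)
      have hbc3 : ((c3 : Char) == ':') = false := beq_eq_false_iff_ne.mpr hc3
      by_cases hfwd : PySem.Chars.lowerChar c1 = 'f' ∧ PySem.Chars.lowerChar c2 = 'w'
          ∧ PySem.Chars.lowerChar c3 = 'd'
      · match r with
        | [] =>
          refine Or.inl ⟨?_, ?_⟩
          · simp [pvLoweredGuard, PySem.Chars.startswith, PySem.Chars.lower, List.isPrefixOf,
              hb3, hfwd.1, hfwd.2.1, hfwd.2.2]
          · simp [pvMatchPrefix, hbc3, hfwd.1, hfwd.2.1, hfwd.2.2]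
        | c4 :: r' =>
          by_cases hc4 : c4 = ':'
          · subst hc4
            have ha : c1 ≠ ':' := by
              intro he; rw [he, hco] at hfwd; exact absurd hfwd.1 (by decide)
            have hb : c2 ≠ ':' := by
              intro he; rw [he, hco] at hfwd; exact absurd hfwd.2.1 (by decide)
            refine Or.inr ⟨r', ?_, ?_, ?_, by simp, ⟨[c1, c2, c3, ':'], rfl⟩⟩
            · simp [pvLoweredGuard, PySem.Chars.startswith, PySem.Chars.lower, List.isPrefixOf,
                hfwd.1, hfwd.2.1, hfwd.2.2, hco]
            · simp [pvMatchPrefix, hbc3, hfwd.1, hfwd.2.1, hfwd.2.2]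
            · unfold pvSplitTail
              rw [pv_split3 _ _ _ _ ha hb hc3, pv_pyGet1]
          · have hl4 : PySem.Chars.lowerChar c4 ≠ ':' := fun hh => hc4 (pvLower_colon _ hh)
            have hb4 : ((':' : Char) == PySem.Chars.lowerChar c4) = false :=
              beq_eq_false_iff_ne.mpr (Ne.symm hl4)
            have hbc4 : ((c4 : Char) == ':') = false := beq_eq_false_iff_ne.mpr hc4
            refine Or.inl ⟨?_, ?_⟩
            · simp [pvLoweredGuard, PySem.Chars.startswith, PySem.Chars.lower, List.isPrefixOf,
                hb3, hb4, hfwd.1, hfwd.2.1, hfwd.2.2]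
            · simp [pvMatchPrefix, hbc3, hbc4, hfwd.1, hfwd.2.1, hfwd.2.2]
      · constructor
        constructor
        · by_cases a3 : PySem.Chars.lowerChar c1 = 'f' <;>
          by_cases a4 : PySem.Chars.lowerChar c2 = 'w' <;>
          by_cases a5 : PySem.Chars.lowerChar c3 = 'd' <;>
            (try simp_all [pvLoweredGuard, PySem.Chars.startswith, PySem.Chars.lower,
              List.isPrefixOf, hb3]) <;>
            (try (intro h1
                  first
                  | exact absurd h1.symm a3
                  | exact absurd h1.symm a4
                  | exact absurd h1.symm a5
                  | (intro h2
                     first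
                     | exact absurd h2.symm a4
                     | exact absurd h2.symm a5
                     | (intro h3; exact absurd h3.symm a5))))
        · by_cases a3 : PySem.Chars.lowerChar c1 = 'f' <;>
          by_cases a4 : PySem.Chars.lowerChar c2 = 'w' <;>
          by_cases a5 : PySem.Chars.lowerChar c3 = 'd' <;>
            (try simp_all [pvMatchPrefix, hbc3]) <;> (try simp_all [eq_comm])


-- every Python-whitespace char of cs is a plain space
def pvOnlySpace (cs : List Char) : Prop := ∀ c ∈ cs, PySem.Chars.isspace c = true → c = ' '
-- cs does not end in whitespace
def pvNoTrail (cs : List Char) : Prop := ∀ c, cs.getLast? = some c → PySem.Chars.isspace c = false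

lemma pvRegexSpace_isspace (c : Char) (h : pvIsRegexSpace c = true) :
    PySem.Chars.isspace c = true := by
  simp only [pvIsRegexSpace, Bool.or_eq_true, beq_iff_eq] at h
  rcases h with ((((h | h) | h) | h) | h) | h <;> subst h <;> decide

lemma pv_dropWhile_congr (cs : List Char) (h : pvOnlySpace cs) :
    cs.dropWhile PySem.Chars.isspace = cs.dropWhile pvIsRegexSpace := by
  induction cs with
  | nil => rfl
  | cons c t ih =>
    by_cases hc : PySem.Chars.isspace c = true
    · have hsp : c = ' ' := h c (by simp) hc
      subst hsp
      rw [List.dropWhile_cons_of_pos hc, List.dropWhile_cons_of_pos (by decide)]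
      exact ih (fun d hd hds => h d (by simp [hd]) hds)
    · have hr : ¬ pvIsRegexSpace c = true := fun hh => hc (pvRegexSpace_isspace c hh)
      rw [List.dropWhile_cons_of_neg hc, List.dropWhile_cons_of_neg hr]

lemma pv_getLast?_mem (l : List Char) (c : Char) (h : l.getLast? = some c) : c ∈ l := by
  rw [List.getLast?_eq_head?_reverse] at h
  cases hr : l.reverse with
  | nil => rw [hr] at h; cases h
  | cons a t =>
    rw [hr] at h
    have hac : a = c := by simpa using h
    subst hac
    have hm : a ∈ l.reverse := by rw [hr]; simp
    exact List.mem_reverse.mp hm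

lemma pv_rstrip_id (d : List Char) (h : pvNoTrail d) : PySem.Chars.rstrip d = d := by
  unfold PySem.Chars.rstrip
  cases hr : d.reverse with
  | nil =>
    have hd : d = [] := by simpa using congrArg List.reverse hr
    simp [hd]
  | cons c t =>
    have hlast : d.getLast? = some c := by
      rw [List.getLast?_eq_head?_reverse, hr]; rfl
    rw [List.dropWhile_cons_of_neg (by simp [h c hlast]), ← hr, List.reverse_reverse]

lemma pv_suffix_inv (cs rest : List Char) (hs : rest <:+ cs) (h1 : pvOnlySpace cs)
    (h2 : pvNoTrail cs) : pvOnlySpace rest ∧ pvNoTrail rest := by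
  obtain ⟨t, rfl⟩ := hs
  constructor
  · exact fun c hc hsp => h1 c (List.mem_append_right t hc) hsp
  · intro c hc
    apply h2 c
    rw [List.getLast?_append_of_ne_nil t (by rintro rfl; cases hc)]
    exact hc

lemma pv_strip_eq (rest : List Char) (h1 : pvOnlySpace rest) (h2 : pvNoTrail rest) :
    PySem.Chars.strip rest = rest.dropWhile pvIsRegexSpace := by
  unfold PySem.Chars.strip PySem.Chars.lstrip
  have hsuf : rest.dropWhile PySem.Chars.isspace <:+ rest := List.dropWhile_suffix _
  have hinv := pv_suffix_inv rest _ hsuf h1 h2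
  rw [pv_rstrip_id _ hinv.2, pv_dropWhile_congr rest h1]

lemma pv_loop_eq : ∀ (f g : Nat) (cs : List Char), cs.length < f → cs.length < g →
    pvOnlySpace cs → pvNoTrail cs → pvALoop f cs = pvBStrip g cs := by
  intro f
  induction f with
  | zero => intro g cs hf; omega
  | succ f ih =>
    intro g cs hf hg h1 h2
    cases g with
    | zero => omega
    | succ g =>
      rcases pvStep cs with ⟨hgd, hm⟩ | ⟨rest, hgd, hm, he, hl, hsuf⟩
      · simp [pvALoop, pvBStrip, hgd, hm]
      · simp only [pvALoop, pvBStrip, hgd, hm, if_true]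
        have hinv := pv_suffix_inv cs rest hsuf h1 h2
        rw [he, pv_strip_eq rest hinv.1 hinv.2]
        have hd : rest.dropWhile pvIsRegexSpace <:+ rest := List.dropWhile_suffix _
        have hinv2 := pv_suffix_inv rest _ hd hinv.1 hinv.2
        have hdl := List.length_dropWhile_le pvIsRegexSpace rest
        exact ih g _ (by omega) (by omega) hinv2.1 hinv2.2

def pvWordP (p : List Char) : Prop := p ≠ [] ∧ ∀ c ∈ p, PySem.Chars.isspace c = false

lemma pv_go_words (cs : List Char) : ∀ cur acc, (∀ c ∈ cur, PySem.Chars.isspace c = false) →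
    (∀ p ∈ acc, pvWordP p) → ∀ p ∈ PySem.Chars.split₀.go cs cur acc, pvWordP p := by
  induction cs with
  | nil =>
    intro cur acc hcur hacc p hp
    simp only [PySem.Chars.split₀.go] at hp
    split at hp
    · exact hacc p (by simpa using hp)
    · rw [List.mem_reverse, List.mem_cons] at hp
      rcases hp with rfl | hp
      · exact ⟨by simpa [List.reverse_eq_nil_iff] using (by simp_all : cur ≠ []),
          fun c hc => hcur c (by simpa using hc)⟩
      · exact hacc p hp
  | cons c t ih =>
    intro cur acc hcur hacc p hp
    simp only [PySem.Chars.split₀.go] at hp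
    split at hp
    · split at hp
      · exact ih [] acc (by simp) hacc p hp
      · refine ih [] (cur.reverse :: acc) (by simp) ?_ p hp
        intro q hq
        rcases List.mem_cons.mp hq with rfl | hq
        · exact ⟨by simpa [List.reverse_eq_nil_iff] using (by simp_all : cur ≠ []),
            fun d hd => hcur d (by simpa using hd)⟩
        · exact hacc q hq
    · refine ih (c :: cur) acc ?_ hacc p hp
      intro d hd
      rcases List.mem_cons.mp hd with rfl | hd
      · simp_all
      · exact hcur d hd

lemma pv_join_ne_nil (q : List Char) (ps : List (List Char)) (hq : q ≠ []) :
    PySem.Chars.join [' '] (q :: ps) ≠ [] := by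
  cases ps with
  | nil => rw [PySem.Chars.join_singleton]; exact hq
  | cons p rest =>
    rw [PySem.Chars.join_cons_cons]
    intro h
    rcases List.append_eq_nil_iff.mp h with ⟨h1, _⟩
    rcases List.append_eq_nil_iff.mp h1 with ⟨h2, _⟩
    exact hq h2

lemma pv_join_inv (parts : List (List Char)) (h : ∀ p ∈ parts, pvWordP p) :
    pvOnlySpace (PySem.Chars.join [' '] parts) ∧ pvNoTrail (PySem.Chars.join [' '] parts) := by
  induction parts with
  | nil =>
    rw [PySem.Chars.join_nil]
    exact ⟨fun c hc => absurd hc (List.not_mem_nil), fun c hc => by cases hc⟩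
  | cons p ps ih =>
    cases ps with
    | nil =>
      rw [PySem.Chars.join_singleton]
      have hw := h p (by simp)
      refine ⟨fun c hc hsp => absurd hsp (by simp [hw.2 c hc]), fun c hc => ?_⟩
      exact hw.2 c (pv_getLast?_mem _ _ hc)
    | cons q ps' =>
      have hih := ih (fun r hr => h r (List.mem_cons_of_mem _ hr))
      have hw := h p (by simp)
      have hq := h q (by simp)
      rw [PySem.Chars.join_cons_cons]
      constructor
      · intro c hc hsp
        rcases List.mem_append.mp hc with hc | hc
        · rcases List.mem_append.mp hc with hc | hc
          · exact absurd hsp (by simp [hw.2 c hc])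
          · simpa using hc
        · exact hih.1 c hc hsp
      · intro c hc
        have hne := pv_join_ne_nil q ps' hq.1
        rw [List.append_assoc, List.getLast?_append_of_ne_nil _ (by
          simp [List.append_eq_nil_iff, hne]), List.getLast?_append_of_ne_nil _ hne] at hc
        exact hih.2 c hc

-- ===== VERDICT (by name: the statement is the Claim_ definition above) =====
theorem subject_norm_py_spec : Claim_equal_subject_norm_py := by
  intro subject _
  unfold Spec_subject_norm_py subject_norm_py subject_norm_py_alt
  match subject with
  | none => rfl
  | some s =>
    by_cases hs : s = ""
    · simp [hs]
    · simp only [if_neg hs]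
      have hL : (PySem.Str.join " " (PySem.Str.split₀ (PySem.Str.strip s))).toList
          = PySem.Chars.join [' '] (PySem.Chars.split₀ (PySem.Chars.strip s.toList)) := by
        simp [PySem.Str.join, PySem.Str.split₀, PySem.Str.strip, String.toList_ofList,
          List.map_map, Function.comp_def]
      have hw : ∀ p ∈ PySem.Chars.split₀ (PySem.Chars.strip s.toList), pvWordP p :=
        pv_go_words _ [] [] (by simp) (by simp)
      have hinv := pv_join_inv _ hw
      have heq := pv_loop_eq
        ((PySem.Chars.join [' '] (PySem.Chars.split₀ (PySem.Chars.strip s.toList))).length + 1)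
        ((PySem.Chars.join [' '] (PySem.Chars.split₀ (PySem.Chars.strip s.toList))).length + 1)
        (PySem.Chars.join [' '] (PySem.Chars.split₀ (PySem.Chars.strip s.toList)))
        (by omega) (by omega) hinv.1 hinv.2
      rw [hL, heq]
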